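-- pv_equiv track=rewrite | github.com/ChunkyTortoise/EnterpriseHub | ghl_real_estate_ai/ml/predictive_lead_scoring_engine.py | _count_answered_core_questions
-- ===== SOURCE A (Python) =====
-- from typing import Dict, List, Any, Optional, Tuple
--
-- def _count_answered_core_questions(conversations: List[Dict]) -> int:
--     """Count how many of Jorge's 4 core questions have been answered."""
--     # Jorge's core qualification questions
--     core_questions_keywords = [
--         ['ready', 'sell', 'decision'],  # Are you ready to sell?
--         ['timeline', 'when', 'time'],   # What's your timeline?
--         ['price', 'value', 'worth'],    # What do you think it's worth?
--         ['agent', 'realtor', 'work']    # Have you worked with an agent?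
--     ]
--
--     answered_questions = 0
--     all_lead_messages = []
--
--     for conv in conversations:
--         lead_messages = [msg.get('message', '').lower()
--                        for msg in conv.get('messages', [])
--                        if msg.get('sender') == 'lead']
--         all_lead_messages.extend(lead_messages)
--
--     combined_text = ' '.join(all_lead_messages)
--
--     for question_keywords in core_questions_keywords:
--         if any(keyword in combined_text for keyword in question_keywords):
--             answered_questions += 1
--
--     return answered_questions
-- ===== SOURCE B (Python) =====
-- def _count_answered_core_questions(conversations):
--     """Count how many of Jorge's 4 core questions have been answered."""
--     core_questions_keywords = [
--         ['ready', 'sell', 'decision'],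
--         ['timeline', 'when', 'time'],
--         ['price', 'value', 'worth'],
--         ['agent', 'realtor', 'work'],
--     ]
--
--     answered = set()
--     for conv in conversations:
--         for msg in conv.get('messages', []):
--             if msg.get('sender') != 'lead':
--                 continue
--             text = msg.get('message', '').lower()
--             for i, keywords in enumerate(core_questions_keywords):
--                 if i not in answered and any(k in text for k in keywords):
--                     answered.add(i)
--     return len(answered)
-- ===== Notes on version B (the rewrite author's own statement) =====
-- stated objective: alternative
-- what changed: B drops A's flatten-join step (concatenating all lead messages into one combined string and rescanning it once per keyword) and instead makes a single stateful pass over the messages, accumulating the set of answered question indices and returning its size.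
import Mathlib
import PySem

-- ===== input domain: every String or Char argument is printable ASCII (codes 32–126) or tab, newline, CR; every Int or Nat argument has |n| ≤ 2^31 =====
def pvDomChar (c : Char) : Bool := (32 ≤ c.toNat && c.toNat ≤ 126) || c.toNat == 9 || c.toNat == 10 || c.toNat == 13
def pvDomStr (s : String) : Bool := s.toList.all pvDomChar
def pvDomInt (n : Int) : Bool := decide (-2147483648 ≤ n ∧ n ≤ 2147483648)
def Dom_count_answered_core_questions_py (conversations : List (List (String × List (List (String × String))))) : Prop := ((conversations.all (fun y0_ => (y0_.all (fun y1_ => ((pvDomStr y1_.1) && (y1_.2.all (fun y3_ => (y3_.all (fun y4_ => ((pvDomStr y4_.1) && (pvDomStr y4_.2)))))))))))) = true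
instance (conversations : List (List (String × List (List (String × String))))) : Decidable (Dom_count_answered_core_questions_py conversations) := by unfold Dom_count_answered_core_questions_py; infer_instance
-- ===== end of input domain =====

-- B replaces A's join-then-rescan (flatten all lead messages into one string, then scan it per keyword)
-- by a single stateful pass over the messages accumulating the set of answered question indices (objective: alternative).

-- Jorge's four core-question keyword groups (shared data table of both ports).
def pvCoreQ : List (List String) :=
  [["ready", "sell", "decision"],
   ["timeline", "when", "time"],
   ["price", "value", "worth"],
   ["agent", "realtor", "work"]]

-- ===== PORT A =====
def count_answered_core_questions_py (conversations : List (List (String × List (List (String × String))))) : Int :=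
  let all_lead_messages : List String :=
    conversations.foldl (fun acc conv =>
      acc ++ ((PySem.Dict.getD (PySem.Dict.mk conv) "messages" []).filter
                (fun msg => (PySem.Dict.get? (PySem.Dict.mk msg) "sender") == some "lead")).map
              (fun msg => PySem.Str.lower (PySem.Dict.getD (PySem.Dict.mk msg) "message" ""))) []
  let combined_text := PySem.Str.join " " all_lead_messages
  pvCoreQ.foldl (fun n q => if q.any (fun kw => PySem.Str.isIn kw combined_text) then n + 1 else n) 0

-- ===== PORT B =====
def count_answered_core_questions_py_alt (conversations : List (List (String × List (List (String × String))))) : Int :=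
  let answered : PySem.Set Int :=
    conversations.foldl (fun ans conv =>
      (PySem.Dict.getD (PySem.Dict.mk conv) "messages" []).foldl (fun ans msg =>
        if (PySem.Dict.get? (PySem.Dict.mk msg) "sender") != some "lead" then ans
        else
          let text := PySem.Str.lower (PySem.Dict.getD (PySem.Dict.mk msg) "message" "")
          (PySem.List.enumerate pvCoreQ).foldl (fun ans iq =>
            if !(PySem.Set.contains ans iq.1) && iq.2.any (fun k => PySem.Str.isIn k text) then
              PySem.Set.add ans iq.1
            else ans) ans) ans) PySem.Set.empty
  PySem.Set.len answered

-- ===== PRECONDITION & SPEC =====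
def Spec_count_answered_core_questions_py (conversations : List (List (String × List (List (String × String))))) (out : Int) : Prop := out = count_answered_core_questions_py_alt conversations
instance (conversations : List (List (String × List (List (String × String))))) (out : Int) : Decidable (Spec_count_answered_core_questions_py conversations out) := by unfold Spec_count_answered_core_questions_py; infer_instance

-- ===== CLAIM (what is proved, stated in full; the proofs are below) =====
def Claim_equal_count_answered_core_questions_py : Prop := ∀ (conversations : List (List (String × List (List (String × String))))), Dom_count_answered_core_questions_py conversations → Spec_count_answered_core_questions_py conversations (count_answered_core_questions_py conversations)

-- ===== LEMMAS AND PROOFS =====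

-- The flattened, lowercased lead-message texts both programs effectively read.
def pvTexts (conversations : List (List (String × List (List (String × String))))) : List String :=
  conversations.flatMap (fun conv =>
    ((PySem.Dict.getD (PySem.Dict.mk conv) "messages" []).filter
       (fun msg => (PySem.Dict.get? (PySem.Dict.mk msg) "sender") == some "lead")).map
     (fun msg => PySem.Str.lower (PySem.Dict.getD (PySem.Dict.mk msg) "message" "")))

-- splitting a prefix of an append
lemma pvPrefixSplit {α : Type} (a : List α) (b l : List α) (h : l <+: a ++ b) :
    l <+: a ∨ ∃ l2, l = a ++ l2 ∧ l2 <+: b := by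
  induction a generalizing l with
  | nil => exact Or.inr ⟨l, rfl, by simpa using h⟩
  | cons x a ih =>
    cases l with
    | nil => exact Or.inl (List.nil_prefix)
    | cons y l =>
      rw [List.cons_append, List.cons_prefix_cons] at h
      obtain ⟨rfl, h⟩ := h
      rcases ih l h with h' | ⟨l2, rfl, h2⟩
      · exact Or.inl (List.cons_prefix_cons.mpr ⟨rfl, h'⟩)
      · exact Or.inr ⟨l2, by simp, h2⟩

-- splitting an infix of an append
lemma pvInfixSplit {α : Type} (a : List α) (b l : List α) (h : l <:+: a ++ b) :
    l <:+: a ∨ l <:+: b ∨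
      ∃ l1 l2, l = l1 ++ l2 ∧ l1 ≠ [] ∧ l2 ≠ [] ∧ l1 <:+ a ∧ l2 <+: b := by
  induction a generalizing l with
  | nil => exact Or.inr (Or.inl (by simpa using h))
  | cons x a ih =>
    rw [List.cons_append, List.infix_cons_iff] at h
    rcases h with h | h
    · rw [← List.cons_append] at h
      rcases pvPrefixSplit (x :: a) b l h with h' | ⟨l2, rfl, h2⟩
      · exact Or.inl h'.isInfix
      · rcases eq_or_ne l2 [] with rfl | hl2
        · exact Or.inl (by simpa using List.infix_refl (x :: a))
        · exact Or.inr (Or.inr ⟨x :: a, l2, rfl, by simp, hl2, List.suffix_refl _, h2⟩)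
    · rcases ih l h with h' | h' | ⟨l1, l2, rfl, h1, h2, hs, hp⟩
      · exact Or.inl (h'.trans (List.infix_cons_iff.mpr (Or.inr (List.infix_refl a))))
      · exact Or.inr (Or.inl h')
      · exact Or.inr (Or.inr ⟨l1, l2, rfl, h1, h2, hs.trans (List.suffix_cons x a), hp⟩)

-- a space-free nonempty word is an infix of ' '.join(parts) iff it is an infix of one part
lemma pvInfixJoinSpace (kw : List Char) (hne : kw ≠ []) (hsp : ' ' ∉ kw)
    (parts : List (List Char)) :
    kw <:+: PySem.Chars.join [' '] parts ↔ ∃ p ∈ parts, kw <:+: p := by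
  induction parts with
  | nil => simp [PySem.Chars.join_nil, List.infix_nil, hne]
  | cons p rest ih =>
    cases rest with
    | nil =>
      simp [PySem.Chars.join_singleton]
    | cons q rest' =>
      rw [PySem.Chars.join_cons_cons, List.append_assoc]
      constructor
      · intro h
        rcases pvInfixSplit p ([' '] ++ PySem.Chars.join [' '] (q :: rest')) kw h with
          h' | h' | ⟨l1, l2, rfl, h1, h2, _, hp⟩
        · exact ⟨p, by simp, h'⟩
        · rcases pvInfixSplit [' '] (PySem.Chars.join [' '] (q :: rest')) kw h' with
            h'' | h'' | ⟨l1, l2, rfl, h1, h2, hs, _⟩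
          · rcases (List.infix_singleton_iff kw ' ').mp h'' with rfl | rfl
            · exact absurd rfl hne
            · exact absurd (by simp : ' ' ∈ [' ']) (by simp at hsp)
          · obtain ⟨r, hr, hkr⟩ := ih.mp h''
            exact ⟨r, by simp [hr], hkr⟩
          · -- l1 is a nonempty suffix of [' '], hence l1 = [' '], so ' ' ∈ kw
            exfalso
            obtain ⟨s, hs'⟩ := hs
            have : ' ' ∈ l1 ++ l2 := by
              cases s with
              | nil => simp at hs'; simp [hs']
              | cons z s' =>
                have : s' ++ l1 = [] := by
                  have := congrArg List.tail hs'
                  simpa using this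
                exact absurd (List.append_eq_nil_iff.mp this).2 h1
            exact hsp this
        · -- l2 is a nonempty prefix of ' '::…, so it starts with ' '
          exfalso
          cases l2 with
          | nil => exact h2 rfl
          | cons y l2' =>
            rw [List.singleton_append, List.cons_prefix_cons] at hp
            exact hsp (by simp [hp.1])
      · rintro ⟨r, hr, hkr⟩
        rcases List.mem_cons.mp hr with rfl | hr'
        · exact hkr.trans (List.prefix_append _ _).isInfix
        · have : kw <:+: PySem.Chars.join [' '] (q :: rest') := ih.mpr ⟨r, hr', hkr⟩
          refine this.trans ?_
          rw [← List.append_assoc]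
          exact (List.suffix_append (p ++ [' ']) _).isInfix

-- B's three loop bodies, named for the proofs (definitionally equal to the port's lambdas).
def pvQstep (t : String) : PySem.Set Int → (Int × List String) → PySem.Set Int :=
  fun ans iq =>
    if !(PySem.Set.contains ans iq.1) && iq.2.any (fun k => PySem.Str.isIn k t) then
      PySem.Set.add ans iq.1
    else ans

def pvMstep : PySem.Set Int → List (String × String) → PySem.Set Int :=
  fun ans msg =>
    if (PySem.Dict.get? (PySem.Dict.mk msg) "sender") != some "lead" then ans
    else (PySem.List.enumerate pvCoreQ).foldl
      (pvQstep (PySem.Str.lower (PySem.Dict.getD (PySem.Dict.mk msg) "message" ""))) ans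

def pvCstep : PySem.Set Int → List (String × List (List (String × String))) → PySem.Set Int :=
  fun ans conv => (PySem.Dict.getD (PySem.Dict.mk conv) "messages" []).foldl pvMstep ans

-- question index x is answered by text t
def pvHit (x : Int) (t : String) : Prop :=
  ∃ iq ∈ PySem.List.enumerate pvCoreQ, x = iq.1 ∧ iq.2.any (fun k => PySem.Str.isIn k t) = true

lemma pvMemQFold (t : String) (qs : List (Int × List String)) (s : PySem.Set Int) (x : Int) :
    x ∈ qs.foldl (pvQstep t) s ↔
      x ∈ s ∨ ∃ iq ∈ qs, x = iq.1 ∧ iq.2.any (fun k => PySem.Str.isIn k t) = true := by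
  induction qs generalizing s with
  | nil => simp
  | cons iq qs ih =>
    rw [List.foldl_cons, ih]
    by_cases hc : (!(PySem.Set.contains s iq.1) && iq.2.any (fun k => PySem.Str.isIn k t)) = true
    · rw [show pvQstep t s iq = PySem.Set.add s iq.1 from by simp only [pvQstep]; rw [if_pos hc]]
      rw [PySem.Set.mem_add]
      simp only [Bool.and_eq_true, Bool.not_eq_true'] at hc
      constructor
      · rintro (⟨h | rfl⟩ | h)
        · exact Or.inl h
        · exact Or.inr ⟨iq, by simp, rfl, hc.2⟩
        · obtain ⟨jq, hj, hx, ha⟩ := h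
          exact Or.inr ⟨jq, by simp [hj], hx, ha⟩
      · rintro (h | ⟨jq, hj, hx, ha⟩)
        · exact Or.inl (Or.inl h)
        · rcases List.mem_cons.mp hj with rfl | hj'
          · exact Or.inl (Or.inr hx)
          · exact Or.inr ⟨jq, hj', hx, ha⟩
    · rw [show pvQstep t s iq = s from by simp only [pvQstep]; rw [if_neg hc]]
      simp only [Bool.and_eq_true, Bool.not_eq_true'] at hc
      constructor
      · rintro (h | ⟨jq, hj, hx, ha⟩)
        · exact Or.inl h
        · exact Or.inr ⟨jq, by simp [hj], hx, ha⟩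
      · rintro (h | ⟨jq, hj, hx, ha⟩)
        · exact Or.inl h
        · rcases List.mem_cons.mp hj with rfl | hj'
          · -- condition failed: either already in s, or the keyword test is false
            cases hmem : PySem.Set.contains s jq.1 with
            | false => exact absurd ⟨hmem, ha⟩ hc
            | true => exact Or.inl (hx ▸ (PySem.Set.contains_iff s jq.1).mp hmem)
          · exact Or.inr ⟨jq, hj', hx, ha⟩

lemma pvNodupQFold (t : String) (qs : List (Int × List String)) (s : PySem.Set Int)
    (hs : s.Nodup) : (qs.foldl (pvQstep t) s).Nodup := by
  induction qs generalizing s with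
  | nil => exact hs
  | cons iq qs ih =>
    rw [List.foldl_cons]
    apply ih
    unfold pvQstep
    split
    · exact PySem.Set.nodup_add s iq.1 hs
    · exact hs

-- lead texts of one conversation's message list
def pvMsgTexts (msgs : List (List (String × String))) : List String :=
  (msgs.filter (fun msg => (PySem.Dict.get? (PySem.Dict.mk msg) "sender") == some "lead")).map
    (fun msg => PySem.Str.lower (PySem.Dict.getD (PySem.Dict.mk msg) "message" ""))

lemma pvMemMsgFold (msgs : List (List (String × String))) (s : PySem.Set Int) (x : Int) :
    x ∈ msgs.foldl pvMstep s ↔ x ∈ s ∨ ∃ t ∈ pvMsgTexts msgs, pvHit x t := by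
  induction msgs generalizing s with
  | nil => simp [pvMsgTexts]
  | cons msg msgs ih =>
    rw [List.foldl_cons, ih]
    by_cases hc : ((PySem.Dict.get? (PySem.Dict.mk msg) "sender") == some "lead") = true
    · have hb : ((PySem.Dict.get? (PySem.Dict.mk msg) "sender") != some "lead") = false := by
        simp [bne, hc]
      rw [show pvMstep s msg
            = (PySem.List.enumerate pvCoreQ).foldl
                (pvQstep (PySem.Str.lower (PySem.Dict.getD (PySem.Dict.mk msg) "message" ""))) s
          from by simp only [pvMstep]; rw [hb, if_neg Bool.false_ne_true]]
      rw [pvMemQFold]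
      have : pvMsgTexts (msg :: msgs)
          = PySem.Str.lower (PySem.Dict.getD (PySem.Dict.mk msg) "message" "") :: pvMsgTexts msgs := by
        simp [pvMsgTexts, hc]
      rw [this]
      simp only [List.mem_cons, pvHit]
      constructor
      · rintro (⟨h | h⟩ | h)
        · exact Or.inl h
        · exact Or.inr ⟨_, Or.inl rfl, h⟩
        · obtain ⟨t, ht, hh⟩ := h
          exact Or.inr ⟨t, Or.inr ht, hh⟩
      · rintro (h | ⟨t, rfl | ht, hh⟩)
        · exact Or.inl (Or.inl h)
        · exact Or.inl (Or.inr hh)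
        · exact Or.inr ⟨t, ht, hh⟩
    · have h0 : ((PySem.Dict.get? (PySem.Dict.mk msg) "sender") == some "lead") = false := by
        cases h : ((PySem.Dict.get? (PySem.Dict.mk msg) "sender") == some "lead")
        · rfl
        · exact absurd h hc
      have hb : ((PySem.Dict.get? (PySem.Dict.mk msg) "sender") != some "lead") = true := by
        simp [bne, h0]
      rw [show pvMstep s msg = s from by simp only [pvMstep]; rw [if_pos hb]]
      have : pvMsgTexts (msg :: msgs) = pvMsgTexts msgs := by
        simp [pvMsgTexts, hc]
      rw [this]

lemma pvNodupMsgFold (msgs : List (List (String × String))) (s : PySem.Set Int)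
    (hs : s.Nodup) : (msgs.foldl pvMstep s).Nodup := by
  induction msgs generalizing s with
  | nil => simpa
  | cons msg msgs ih =>
    rw [List.foldl_cons]
    apply ih
    unfold pvMstep
    split
    · exact hs
    · exact pvNodupQFold _ _ s hs

lemma pvMemCFold (convs : List (List (String × List (List (String × String)))))
    (s : PySem.Set Int) (x : Int) :
    x ∈ convs.foldl pvCstep s ↔ x ∈ s ∨ ∃ t ∈ pvTexts convs, pvHit x t := by
  induction convs generalizing s with
  | nil => simp [pvTexts]
  | cons conv convs ih =>
    rw [List.foldl_cons, ih]
    rw [show pvCstep s conv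
          = (PySem.Dict.getD (PySem.Dict.mk conv) "messages" []).foldl pvMstep s from rfl]
    rw [pvMemMsgFold]
    have : pvTexts (conv :: convs)
        = pvMsgTexts (PySem.Dict.getD (PySem.Dict.mk conv) "messages" []) ++ pvTexts convs := by
      simp [pvTexts, pvMsgTexts, List.flatMap_cons]
    rw [this]
    simp only [List.mem_append]
    constructor
    · rintro ((h | ⟨t, ht, hh⟩) | ⟨t, ht, hh⟩)
      · exact Or.inl h
      · exact Or.inr ⟨t, Or.inl ht, hh⟩
      · exact Or.inr ⟨t, Or.inr ht, hh⟩
    · rintro (h | ⟨t, ht | ht, hh⟩)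
      · exact Or.inl (Or.inl h)
      · exact Or.inl (Or.inr ⟨t, ht, hh⟩)
      · exact Or.inr ⟨t, ht, hh⟩

lemma pvNodupCFold (convs : List (List (String × List (List (String × String)))))
    (s : PySem.Set Int) (hs : s.Nodup) : (convs.foldl pvCstep s).Nodup := by
  induction convs generalizing s with
  | nil => simpa
  | cons conv convs ih => exact ih _ (pvNodupMsgFold _ s hs)

-- a space-free nonempty keyword is in the joined text iff it is in one of the texts
lemma pvIsInJoin (kw : String) (hne : kw.toList ≠ []) (hsp : ' ' ∉ kw.toList)
    (ts : List String) :
    PySem.Str.isIn kw (PySem.Str.join " " ts) = ts.any (fun t => PySem.Str.isIn kw t) := by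
  rw [Bool.eq_iff_iff]
  rw [PySem.Str.isIn_iff_infix, PySem.Str.toList_join]
  rw [show (" ").toList = [' '] from rfl]
  rw [pvInfixJoinSpace kw.toList hne hsp]
  rw [List.any_eq_true]
  constructor
  · rintro ⟨p, hp, hkp⟩
    obtain ⟨t, ht, rfl⟩ := List.mem_map.mp hp
    exact ⟨t, ht, (PySem.Str.isIn_iff_infix kw t).mpr hkp⟩
  · rintro ⟨t, ht, hk⟩
    exact ⟨t.toList, List.mem_map.mpr ⟨t, ht, rfl⟩, (PySem.Str.isIn_iff_infix kw t).mp hk⟩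

lemma pvAnySwap {α β : Type} (l : List α) (m : List β) (p : α → β → Bool) :
    (l.any fun a => m.any fun b => p a b) = (m.any fun b => l.any fun a => p a b) := by
  rw [Bool.eq_iff_iff]
  simp only [List.any_eq_true]
  tauto

-- question group i answered by some text in ts
def pvB (ts : List String) (i : Nat) : Bool :=
  ts.any (fun t => (pvCoreQ.getD i []).any (fun kw => PySem.Str.isIn kw t))

-- A's count as a function of the four Bool tests
lemma pvAeq (ts : List String) :
    pvCoreQ.foldl
      (fun n q => if q.any (fun kw => PySem.Str.isIn kw (PySem.Str.join " " ts)) then n + 1 else n) 0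
    = ((if pvB ts 0 then 1 else 0) + (if pvB ts 1 then 1 else 0)
        + (if pvB ts 2 then 1 else 0) + (if pvB ts 3 then 1 else 0) : Int) := by
  have h : ∀ (q : List String), (∀ kw ∈ q, kw.toList ≠ [] ∧ ' ' ∉ kw.toList) →
      (q.any fun kw => PySem.Str.isIn kw (PySem.Str.join " " ts))
        = (ts.any fun t => q.any fun kw => PySem.Str.isIn kw t) := by
    intro q hq
    rw [PySem.List.any_congr_mem (g := fun kw => ts.any fun t => PySem.Str.isIn kw t)
          (fun kw hkw => pvIsInJoin kw (hq kw hkw).1 (hq kw hkw).2 ts)]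
    exact pvAnySwap q ts (fun kw t => PySem.Str.isIn kw t)
  have h0 := h ["ready", "sell", "decision"]
    (by intro kw hkw; fin_cases hkw <;> exact ⟨by decide, by decide⟩)
  have h1 := h ["timeline", "when", "time"]
    (by intro kw hkw; fin_cases hkw <;> exact ⟨by decide, by decide⟩)
  have h2 := h ["price", "value", "worth"]
    (by intro kw hkw; fin_cases hkw <;> exact ⟨by decide, by decide⟩)
  have h3 := h ["agent", "realtor", "work"]
    (by intro kw hkw; fin_cases hkw <;> exact ⟨by decide, by decide⟩)
  unfold pvB
  simp only [pvCoreQ, List.foldl_cons, List.foldl_nil,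
    List.getD_cons_zero, List.getD_cons_succ]
  rw [h0, h1, h2, h3]
  split_ifs <;> norm_num

-- B's reachable indices, as a function of the four Bool tests
lemma pvBeq (ts : List String) (x : Int) :
    (∃ t ∈ ts, pvHit x t) ↔
      (x = 0 ∧ pvB ts 0 = true) ∨ (x = 1 ∧ pvB ts 1 = true)
        ∨ (x = 2 ∧ pvB ts 2 = true) ∨ (x = 3 ∧ pvB ts 3 = true) := by
  unfold pvHit pvB
  rw [show PySem.List.enumerate pvCoreQ
        = [(0, pvCoreQ.getD 0 []), (1, pvCoreQ.getD 1 []),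
           (2, pvCoreQ.getD 2 []), (3, pvCoreQ.getD 3 [])] from rfl]
  constructor
  · rintro ⟨t, ht, iq, hiq, rfl, ha⟩
    simp only [List.mem_cons, List.not_mem_nil, or_false] at hiq
    obtain ⟨x, hx, hin⟩ := List.any_eq_true.mp ha
    rcases hiq with rfl | rfl | rfl | rfl
    · exact Or.inl ⟨rfl, List.any_eq_true.mpr ⟨t, ht, List.any_eq_true.mpr ⟨x, hx, hin⟩⟩⟩
    · exact Or.inr (Or.inl ⟨rfl, List.any_eq_true.mpr ⟨t, ht, List.any_eq_true.mpr ⟨x, hx, hin⟩⟩⟩)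
    · exact Or.inr (Or.inr (Or.inl ⟨rfl, List.any_eq_true.mpr ⟨t, ht, List.any_eq_true.mpr ⟨x, hx, hin⟩⟩⟩))
    · exact Or.inr (Or.inr (Or.inr ⟨rfl, List.any_eq_true.mpr ⟨t, ht, List.any_eq_true.mpr ⟨x, hx, hin⟩⟩⟩))
  · rintro (⟨rfl, hb⟩ | ⟨rfl, hb⟩ | ⟨rfl, hb⟩ | ⟨rfl, hb⟩) <;>
      obtain ⟨t, ht, ha⟩ := List.any_eq_true.mp hb
    · exact ⟨t, ht, (0, pvCoreQ.getD 0 []), by simp, rfl, ha⟩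
    · exact ⟨t, ht, (1, pvCoreQ.getD 1 []), by simp, rfl, ha⟩
    · exact ⟨t, ht, (2, pvCoreQ.getD 2 []), by simp, rfl, ha⟩
    · exact ⟨t, ht, (3, pvCoreQ.getD 3 []), by simp, rfl, ha⟩

def pvTarget (ts : List String) : List Int :=
  (if pvB ts 0 then [0] else []) ++ (if pvB ts 1 then [1] else [])
    ++ (if pvB ts 2 then [2] else []) ++ (if pvB ts 3 then [3] else [])

lemma pvMemTarget (ts : List String) (x : Int) :
    x ∈ pvTarget ts ↔
      (x = 0 ∧ pvB ts 0 = true) ∨ (x = 1 ∧ pvB ts 1 = true)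
        ∨ (x = 2 ∧ pvB ts 2 = true) ∨ (x = 3 ∧ pvB ts 3 = true) := by
  unfold pvTarget
  split_ifs with hb0 hb1 hb2 hb3 <;> simp_all

lemma pvNodupTarget (ts : List String) : (pvTarget ts).Nodup := by
  unfold pvTarget
  split_ifs <;> decide

lemma pvLenTarget (ts : List String) :
    ((pvTarget ts).length : Int)
      = (if pvB ts 0 then 1 else 0) + (if pvB ts 1 then 1 else 0)
          + (if pvB ts 2 then 1 else 0) + (if pvB ts 3 then 1 else 0) := by
  unfold pvTarget
  split_ifs <;> norm_num

-- ===== VERDICT (by name: the statement is the Claim_ definition above) =====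
theorem count_answered_core_questions_py_spec : Claim_equal_count_answered_core_questions_py := by
  intro convs _
  unfold Spec_count_answered_core_questions_py
  have hA : count_answered_core_questions_py convs
      = pvCoreQ.foldl
          (fun n q =>
            if q.any (fun kw => PySem.Str.isIn kw (PySem.Str.join " " (pvTexts convs))) then n + 1
            else n) 0 := by
    simp only [count_answered_core_questions_py, pvTexts,
      PySem.List.foldl_append_eq_flatMap, List.nil_append]
    rfl
  have hB : count_answered_core_questions_py_alt convs
      = PySem.Set.len (convs.foldl pvCstep PySem.Set.empty) := rfl
  have hperm : (convs.foldl pvCstep PySem.Set.empty).Perm (pvTarget (pvTexts convs)) := by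
    rw [List.perm_ext_iff_of_nodup
          (pvNodupCFold convs PySem.Set.empty List.nodup_nil) (pvNodupTarget _)]
    intro x
    rw [pvMemCFold, pvMemTarget, ← pvBeq]
    simp [PySem.Set.empty]
  rw [hA, hB, pvAeq]
  rw [show PySem.Set.len (convs.foldl pvCstep PySem.Set.empty)
        = ((convs.foldl pvCstep PySem.Set.empty).length : Int) from by simp [PySem.Set.len]]
  rw [hperm.length_eq, pvLenTarget]
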